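-- pv_equiv track=rewrite | github.com/ImperialCrise/SYMUA2025 | generate_map.py | expand_orthogonal_path
-- ===== SOURCE A (Python) =====
-- def expand_orthogonal_path(a, b):
--     y1, x1 = a
--     y2, x2 = b
--     path = []
--     cy, cx = y1, x1
--
--     while (cy, cx) != (y2, x2):
--         if cy != y2 and cx != x2:
--             if len(path) % 2 == 0: # Alternate between moving y and x
--                 cy += 1 if cy < y2 else -1
--             else:
--                 cx += 1 if cx < x2 else -1
--             path.append((cy, cx))
--         elif cy != y2:
--             cy += 1 if cy < y2 else -1
--             path.append((cy, cx))
--         elif cx != x2: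
--             cx += 1 if cx < x2 else -1
--             path.append((cy, cx))
--     return path
-- ===== SOURCE B (Python) =====
-- def expand_orthogonal_path(a, b):
--     (y1, x1), (y2, x2) = a, b
--     sy = 1 if y2 > y1 else -1
--     sx = 1 if x2 > x1 else -1
--     dy = abs(y2 - y1)
--     dx = abs(x2 - x1)
--     k = min(dy, dx)
--     path = []
--     cy, cx = y1, x1
--     for _ in range(k):
--         cy += sy
--         path.append((cy, cx))
--         cx += sx
--         path.append((cy, cx))
--     for _ in range(dy - k):
--         cy += sy
--         path.append((cy, cx))
--     for _ in range(dx - k):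
--         cx += sx
--         path.append((cy, cx))
--     return path
-- ===== Notes on version B (the rewrite author's own statement) =====
-- stated objective: alternative
-- what changed: Replaces the parity-driven while loop (branching each step on len(path)%2 and recomputing directions) with a count-first two-phase construction: precompute step signs and k=min(dy,dx), emit k interleaved y/x pairs, then the |dy-dx| remaining straight moves.
import Mathlib
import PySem

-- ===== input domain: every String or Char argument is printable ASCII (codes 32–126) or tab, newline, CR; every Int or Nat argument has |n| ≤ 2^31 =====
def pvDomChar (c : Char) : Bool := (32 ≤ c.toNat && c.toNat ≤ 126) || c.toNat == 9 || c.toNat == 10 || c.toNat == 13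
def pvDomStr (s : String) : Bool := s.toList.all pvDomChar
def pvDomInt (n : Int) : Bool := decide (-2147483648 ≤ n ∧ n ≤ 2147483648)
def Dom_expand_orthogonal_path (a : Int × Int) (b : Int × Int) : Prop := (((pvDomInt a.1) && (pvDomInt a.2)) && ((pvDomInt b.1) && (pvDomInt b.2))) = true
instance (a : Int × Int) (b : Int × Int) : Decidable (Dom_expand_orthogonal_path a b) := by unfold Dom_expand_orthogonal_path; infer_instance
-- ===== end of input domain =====

-- B replaces A's parity-driven while loop by a count-first two-phase construction
-- (k = min(dy,dx) interleaved y/x pairs, then the remaining straight moves); same cost, alternative decomposition.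

-- ===== PORT A =====
-- A's while loop: state (cy, cx, path); branch order and the len(path) % 2 test exactly as in
-- the Python. fuel = |y2-cy| + |x2-cx| is exactly the number of iterations the while loop runs
-- (each iteration moves one step closer), so the fuel guard never fires early: it only makes the
-- same computation total.
def expandAloop (y2 x2 : Int) : Nat → Int → Int → List (Int × Int) → List (Int × Int)
  | 0, _, _, path => path
  | fuel+1, cy, cx, path =>
    if cy = y2 ∧ cx = x2 then path
    else if cy ≠ y2 ∧ cx ≠ x2 then
      if path.length % 2 = 0 then
        expandAloop y2 x2 fuel (cy + if cy < y2 then 1 else -1) cx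
          (path ++ [(cy + (if cy < y2 then 1 else -1), cx)])
      else
        expandAloop y2 x2 fuel cy (cx + if cx < x2 then 1 else -1)
          (path ++ [(cy, cx + (if cx < x2 then 1 else -1))])
    else if cy ≠ y2 then
      expandAloop y2 x2 fuel (cy + if cy < y2 then 1 else -1) cx
        (path ++ [(cy + (if cy < y2 then 1 else -1), cx)])
    else
      expandAloop y2 x2 fuel cy (cx + if cx < x2 then 1 else -1)
        (path ++ [(cy, cx + (if cx < x2 then 1 else -1))])

def expand_orthogonal_path (a : Int × Int) (b : Int × Int) : List (Int × Int) :=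
  expandAloop b.1 b.2 ((b.1 - a.1).natAbs + (b.2 - a.2).natAbs) a.1 a.2 []

-- ===== PORT B =====
-- B's three for-loops, each carried as the state (path, cy, cx) the Python mutates.
def loopZig (sy sx : Int) : Nat → List (Int × Int) × Int × Int → List (Int × Int) × Int × Int
  | 0, st => st
  | n+1, (path, cy, cx) =>
      loopZig sy sx n (path ++ [(cy + sy, cx), (cy + sy, cx + sx)], cy + sy, cx + sx)

def loopY (sy : Int) : Nat → List (Int × Int) × Int × Int → List (Int × Int) × Int × Int
  | 0, st => st
  | n+1, (path, cy, cx) => loopY sy n (path ++ [(cy + sy, cx)], cy + sy, cx)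

def loopX (sx : Int) : Nat → List (Int × Int) × Int × Int → List (Int × Int) × Int × Int
  | 0, st => st
  | n+1, (path, cy, cx) => loopX sx n (path ++ [(cy, cx + sx)], cy, cx + sx)

def expand_orthogonal_path_alt (a : Int × Int) (b : Int × Int) : List (Int × Int) :=
  let sy : Int := if b.1 > a.1 then 1 else -1
  let sx : Int := if b.2 > a.2 then 1 else -1
  let dy : Nat := (b.1 - a.1).natAbs
  let dx : Nat := (b.2 - a.2).natAbs
  let k : Nat := min dy dx
  (loopX sx (dx - k) (loopY sy (dy - k) (loopZig sy sx k ([], a.1, a.2)))).1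

-- ===== PRECONDITION & SPEC =====
def Spec_expand_orthogonal_path (a : Int × Int) (b : Int × Int) (out : List (Int × Int)) : Prop := out = expand_orthogonal_path_alt a b
instance (a : Int × Int) (b : Int × Int) (out : List (Int × Int)) : Decidable (Spec_expand_orthogonal_path a b out) := by unfold Spec_expand_orthogonal_path; infer_instance

-- ===== CLAIM (what is proved, stated in full; the proofs are below) =====
def Claim_equal_expand_orthogonal_path : Prop := ∀ (a : Int × Int) (b : Int × Int), Dom_expand_orthogonal_path a b → Spec_expand_orthogonal_path a b (expand_orthogonal_path a b)

-- ===== LEMMAS AND PROOFS =====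

-- Pure-list descriptions of the three loop phases.
def ylist (sy : Int) : Nat → Int → Int → List (Int × Int)
  | 0, _, _ => []
  | n+1, cy, cx => (cy + sy, cx) :: ylist sy n (cy + sy) cx

def xlist (sx : Int) : Nat → Int → Int → List (Int × Int)
  | 0, _, _ => []
  | n+1, cy, cx => (cy, cx + sx) :: xlist sx n cy (cx + sx)

def ziglist (sy sx : Int) : Nat → Int → Int → List (Int × Int)
  | 0, _, _ => []
  | n+1, cy, cx => (cy + sy, cx) :: (cy + sy, cx + sx) :: ziglist sy sx n (cy + sy) (cx + sx)

-- What B produces: k = min dy dx zig-zag pairs, then the leftover straight moves.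
def rhs (sy sx : Int) (dy dx : Nat) (cy cx : Int) : List (Int × Int) :=
  ziglist sy sx (min dy dx) cy cx
  ++ ylist sy (dy - min dy dx) (cy + ((min dy dx : Nat) : Int) * sy) (cx + ((min dy dx : Nat) : Int) * sx)
  ++ xlist sx (dx - min dy dx)
      (cy + ((min dy dx : Nat) : Int) * sy + ((dy - min dy dx : Nat) : Int) * sy)
      (cx + ((min dy dx : Nat) : Int) * sx)

lemma loopY_spec (sy : Int) (n : Nat) : ∀ (path : List (Int × Int)) (cy cx : Int),
    loopY sy n (path, cy, cx) = (path ++ ylist sy n cy cx, cy + (n : Int) * sy, cx) := by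
  induction n with
  | zero => intro path cy cx; simp [loopY, ylist]
  | succ n ih =>
    intro path cy cx
    rw [loopY, ih, ylist]
    simp only [List.append_assoc, List.singleton_append, Prod.mk.injEq, true_and, and_true]
    push_cast; ring

lemma loopX_spec (sx : Int) (n : Nat) : ∀ (path : List (Int × Int)) (cy cx : Int),
    loopX sx n (path, cy, cx) = (path ++ xlist sx n cy cx, cy, cx + (n : Int) * sx) := by
  induction n with
  | zero => intro path cy cx; simp [loopX, xlist]
  | succ n ih =>
    intro path cy cx
    rw [loopX, ih, xlist]
    simp only [List.append_assoc, List.singleton_append, Prod.mk.injEq, true_and, and_true]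
    push_cast; ring

lemma loopZig_spec (sy sx : Int) (n : Nat) : ∀ (path : List (Int × Int)) (cy cx : Int),
    loopZig sy sx n (path, cy, cx)
      = (path ++ ziglist sy sx n cy cx, cy + (n : Int) * sy, cx + (n : Int) * sx) := by
  induction n with
  | zero => intro path cy cx; simp [loopZig, ziglist]
  | succ n ih =>
    intro path cy cx
    rw [loopZig, ih, ziglist]
    simp only [List.append_assoc, List.cons_append, List.nil_append, List.singleton_append,
      Prod.mk.injEq, true_and, and_true]
    refine ⟨?_, ?_⟩ <;> (push_cast; ring)

-- A's loop from a state with cy = y2 produces the straight x moves.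
lemma A_straightX (n : Nat) : ∀ (fuel : Nat) (y2 x2 cx sx : Int) (path : List (Int × Int)),
    (x2 - cx).natAbs = n → n ≤ fuel →
    (n = 0 ∨ (cx < x2 ∧ sx = 1) ∨ (x2 < cx ∧ sx = -1)) →
    expandAloop y2 x2 fuel y2 cx path = path ++ xlist sx n y2 cx := by
  induction n with
  | zero =>
    intro fuel y2 x2 cx sx path h _ _
    have : cx = x2 := by omega
    subst this
    cases fuel <;> simp [expandAloop, xlist]
  | succ n ih =>
    intro fuel y2 x2 cx sx path h hfuel hs
    obtain ⟨f, rfl⟩ : ∃ f, fuel = f + 1 := ⟨fuel - 1, by omega⟩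
    have hne : cx ≠ x2 := by omega
    have hif : (if cx < x2 then (1:Int) else -1) = sx := by
      rcases hs with h0 | ⟨h1, rfl⟩ | ⟨h1, rfl⟩
      · omega
      · rw [if_pos h1]
      · rw [if_neg (by omega)]
    rw [expandAloop, if_neg (fun hc => hne hc.2), if_neg (fun hc => hc.1 rfl),
      if_neg (fun hc => hc rfl), hif]
    rw [xlist]
    have h' : (x2 - (cx + sx)).natAbs = n := by
      rcases hs with h0 | ⟨h1, rfl⟩ | ⟨h1, rfl⟩ <;> omega
    have hs' : n = 0 ∨ (cx + sx < x2 ∧ sx = 1) ∨ (x2 < cx + sx ∧ sx = -1) := by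
      rcases hs with h0 | ⟨h1, rfl⟩ | ⟨h1, rfl⟩ <;> omega
    rw [ih f y2 x2 _ _ _ h' (by omega) hs']
    simp

-- A's loop from a state with cx = x2 produces the straight y moves.
lemma A_straightY (n : Nat) : ∀ (fuel : Nat) (y2 x2 cy sy : Int) (path : List (Int × Int)),
    (y2 - cy).natAbs = n → n ≤ fuel →
    (n = 0 ∨ (cy < y2 ∧ sy = 1) ∨ (y2 < cy ∧ sy = -1)) →
    expandAloop y2 x2 fuel cy x2 path = path ++ ylist sy n cy x2 := by
  induction n with
  | zero =>
    intro fuel y2 x2 cy sy path h _ _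
    have : cy = y2 := by omega
    subst this
    cases fuel <;> simp [expandAloop, ylist]
  | succ n ih =>
    intro fuel y2 x2 cy sy path h hfuel hs
    obtain ⟨f, rfl⟩ : ∃ f, fuel = f + 1 := ⟨fuel - 1, by omega⟩
    have hne : cy ≠ y2 := by omega
    have hif : (if cy < y2 then (1:Int) else -1) = sy := by
      rcases hs with h0 | ⟨h1, rfl⟩ | ⟨h1, rfl⟩
      · omega
      · rw [if_pos h1]
      · rw [if_neg (by omega)]
    rw [expandAloop, if_neg (fun hc => hne hc.1), if_neg (fun hc => hc.2 rfl),
      if_pos hne, hif]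
    rw [ylist]
    have h' : (y2 - (cy + sy)).natAbs = n := by
      rcases hs with h0 | ⟨h1, rfl⟩ | ⟨h1, rfl⟩ <;> omega
    have hs' : n = 0 ∨ (cy + sy < y2 ∧ sy = 1) ∨ (y2 < cy + sy ∧ sy = -1) := by
      rcases hs with h0 | ⟨h1, rfl⟩ | ⟨h1, rfl⟩ <;> omega
    rw [ih f y2 x2 _ _ _ h' (by omega) hs']
    simp

lemma rhs_x0 (sy sx : Int) (dx : Nat) (cy cx : Int) :
    rhs sy sx 0 dx cy cx = xlist sx dx cy cx := by
  simp [rhs, ziglist, ylist]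

lemma rhs_y0 (sy sx : Int) (dy : Nat) (cy cx : Int) :
    rhs sy sx dy 0 cy cx = ylist sy dy cy cx := by
  simp [rhs, ziglist, xlist]

lemma rhs_step (sy sx : Int) (dy dx : Nat) (cy cx : Int) (hdy : 1 ≤ dy) (hdx : 1 ≤ dx) :
    rhs sy sx dy dx cy cx
      = (cy + sy, cx) :: (cy + sy, cx + sx) :: rhs sy sx (dy - 1) (dx - 1) (cy + sy) (cx + sx) := by
  obtain ⟨m, rfl⟩ : ∃ m, dy = m + 1 := ⟨dy - 1, by omega⟩
  obtain ⟨l, rfl⟩ : ∃ l, dx = l + 1 := ⟨dx - 1, by omega⟩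
  simp only [rhs, Nat.succ_min_succ, ziglist, Nat.add_sub_cancel]
  have e1 : cy + ((min m l + 1 : Nat) : Int) * sy = cy + sy + ((min m l : Nat) : Int) * sy := by
    push_cast; ring
  have e2 : cx + ((min m l + 1 : Nat) : Int) * sx = cx + sx + ((min m l : Nat) : Int) * sx := by
    push_cast; ring
  rw [e1, e2]
  simp [Nat.succ_sub_succ]

lemma A_main (n : Nat) : ∀ (fuel : Nat) (y2 x2 cy cx sy sx : Int) (path : List (Int × Int)),
    (y2 - cy).natAbs + (x2 - cx).natAbs = n → n ≤ fuel →
    ((y2 - cy).natAbs = 0 ∨ (cy < y2 ∧ sy = 1) ∨ (y2 < cy ∧ sy = -1)) →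
    ((x2 - cx).natAbs = 0 ∨ (cx < x2 ∧ sx = 1) ∨ (x2 < cx ∧ sx = -1)) →
    path.length % 2 = 0 →
    expandAloop y2 x2 fuel cy cx path
      = path ++ rhs sy sx (y2 - cy).natAbs (x2 - cx).natAbs cy cx := by
  induction n using Nat.strong_induction_on with
  | _ n IH =>
    intro fuel y2 x2 cy cx sy sx path hn hfuel hsy hsx hpar
    by_cases hy : cy = y2
    · subst hy
      rw [A_straightX (x2 - cx).natAbs fuel cy x2 cx sx path rfl (by omega)
        (by rcases hsx with h|h|h <;> omega)]
      rw [show (cy - cy).natAbs = 0 by omega, rhs_x0]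
    · by_cases hx : cx = x2
      · subst hx
        rw [A_straightY (y2 - cy).natAbs fuel y2 cx cy sy path rfl (by omega)
          (by rcases hsy with h|h|h <;> omega)]
        rw [show (cx - cx).natAbs = 0 by omega, rhs_y0]
      · have hdy : 1 ≤ (y2 - cy).natAbs := by omega
        have hdx : 1 ≤ (x2 - cx).natAbs := by omega
        have hsy' : (cy < y2 ∧ sy = 1) ∨ (y2 < cy ∧ sy = -1) := by
          rcases hsy with h|h|h
          · omega
          · exact Or.inl h
          · exact Or.inr h
        have hsx' : (cx < x2 ∧ sx = 1) ∨ (x2 < cx ∧ sx = -1) := by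
          rcases hsx with h|h|h
          · omega
          · exact Or.inl h
          · exact Or.inr h
        have hify : (if cy < y2 then (1:Int) else -1) = sy := by
          rcases hsy' with ⟨h1, rfl⟩ | ⟨h1, rfl⟩
          · rw [if_pos h1]
          · rw [if_neg (by omega)]
        have hifx : (if cx < x2 then (1:Int) else -1) = sx := by
          rcases hsx' with ⟨h1, rfl⟩ | ⟨h1, rfl⟩
          · rw [if_pos h1]
          · rw [if_neg (by omega)]
        obtain ⟨f, rfl⟩ : ∃ f, fuel = f + 1 := ⟨fuel - 1, by omega⟩
        rw [expandAloop, if_neg (fun hc => hy hc.1), if_pos ⟨hy, hx⟩, if_pos hpar, hify]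
        rw [rhs_step sy sx _ _ cy cx hdy hdx]
        by_cases h1 : (y2 - (cy + sy)).natAbs = 0
        · have hye : cy + sy = y2 := by omega
          rw [hye]
          rw [A_straightX (x2 - cx).natAbs f y2 x2 cx sx _ rfl (by omega) (Or.inr hsx')]
          rw [show (y2 - cy).natAbs - 1 = 0 by omega, rhs_x0]
          obtain ⟨l, hl⟩ : ∃ l, (x2 - cx).natAbs = l + 1 := ⟨(x2 - cx).natAbs - 1, by omega⟩
          rw [hl, xlist, show (l + 1) - 1 = l by omega]
          simp
        · have hy1 : cy + sy ≠ y2 := by omega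
          obtain ⟨f', rfl⟩ : ∃ f', f = f' + 1 := ⟨f - 1, by omega⟩
          rw [expandAloop, if_neg (fun hc => hy1 hc.1), if_pos ⟨hy1, hx⟩,
            if_neg (by simp; omega), hifx]
          by_cases h2 : (x2 - (cx + sx)).natAbs = 0
          · have hxe : cx + sx = x2 := by omega
            rw [hxe]
            rw [A_straightY (y2 - (cy + sy)).natAbs f' y2 x2 (cy + sy) sy _ rfl
              (by rcases hsy' with ⟨h, rfl⟩ | ⟨h, rfl⟩ <;> omega)
              (by rcases hsy' with ⟨h, rfl⟩ | ⟨h, rfl⟩ <;> omega)]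
            rw [show (x2 - cx).natAbs - 1 = 0 by omega, rhs_y0]
            rw [show (y2 - (cy + sy)).natAbs = (y2 - cy).natAbs - 1 by
              rcases hsy' with ⟨h, rfl⟩ | ⟨h, rfl⟩ <;> omega]
            simp
          · rw [IH (n - 2) (by omega) f' y2 x2 (cy + sy) (cx + sx) sy sx _
              (by rcases hsy' with ⟨h, rfl⟩ | ⟨h, rfl⟩ <;> rcases hsx' with ⟨h', rfl⟩ | ⟨h', rfl⟩ <;> omega)
              (by omega)
              (by rcases hsy' with ⟨h, rfl⟩ | ⟨h, rfl⟩ <;> omega)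
              (by rcases hsx' with ⟨h, rfl⟩ | ⟨h, rfl⟩ <;> omega)
              (by simp [List.length_append]; omega)]
            rw [show (y2 - (cy + sy)).natAbs = (y2 - cy).natAbs - 1 by
              rcases hsy' with ⟨h, rfl⟩ | ⟨h, rfl⟩ <;> omega]
            rw [show (x2 - (cx + sx)).natAbs = (x2 - cx).natAbs - 1 by
              rcases hsx' with ⟨h, rfl⟩ | ⟨h, rfl⟩ <;> omega]
            simp

-- ===== VERDICT (by name: the statement is the Claim_ definition above) =====
theorem expand_orthogonal_path_spec : Claim_equal_expand_orthogonal_path := by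
  intro a b _hdom
  unfold Spec_expand_orthogonal_path expand_orthogonal_path expand_orthogonal_path_alt
  have hsy : (b.1 - a.1).natAbs = 0 ∨ (a.1 < b.1 ∧ (if b.1 > a.1 then (1:Int) else -1) = 1)
      ∨ (b.1 < a.1 ∧ (if b.1 > a.1 then (1:Int) else -1) = -1) := by
    rcases lt_trichotomy a.1 b.1 with h|h|h
    · exact Or.inr (Or.inl ⟨h, if_pos h⟩)
    · left; omega
    · exact Or.inr (Or.inr ⟨h, if_neg (by omega)⟩)
  have hsx : (b.2 - a.2).natAbs = 0 ∨ (a.2 < b.2 ∧ (if b.2 > a.2 then (1:Int) else -1) = 1)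
      ∨ (b.2 < a.2 ∧ (if b.2 > a.2 then (1:Int) else -1) = -1) := by
    rcases lt_trichotomy a.2 b.2 with h|h|h
    · exact Or.inr (Or.inl ⟨h, if_pos h⟩)
    · left; omega
    · exact Or.inr (Or.inr ⟨h, if_neg (by omega)⟩)
  rw [A_main ((b.1 - a.1).natAbs + (b.2 - a.2).natAbs) ((b.1 - a.1).natAbs + (b.2 - a.2).natAbs)
    b.1 b.2 a.1 a.2 _ _ [] rfl (le_refl _) hsy hsx rfl]
  dsimp only
  rw [loopZig_spec, loopY_spec, loopX_spec]
  simp only [rhs, List.nil_append, List.append_assoc]
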